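-- pv_equiv track=rewrite | github.com/wilsonsem/python-dump | learnable_test/testsolution.py | nth_most_ratesignature
-- ===== SOURCE A (Python) =====
-- def nth_most_ratesignature(list,n):
--
--     # empty dict to store array item as key and frequency as value
--     frequency_count = {}
--
--     for i in list:
--         if i in frequency_count:
--             frequency_count[i] += 1
--         else:
--             frequency_count[i] = 1
--
--     #sorting dict values
--     sorted_frequency = sorted(frequency_count.items(), key= lambda x : x[1])
--
--     #returns a pair of the requested rarest term as a tuple
--     rarest_pair = sorted_frequency[n-1]
--
--     #getting rarest item of the array
--     rarest_item = rarest_pair[0]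
--     return rarest_item
-- ===== SOURCE B (Python) =====
-- def nth_most_ratesignature(list, n):
--     # bucket-by-count: sort only the distinct frequencies, then collect items
--     # of each frequency in dict insertion order (stable, like A's stable sort)
--     frequency_count = {}
--     for i in list:
--         frequency_count[i] = frequency_count.get(i, 0) + 1
--     ordered = []
--     for c in sorted(set(frequency_count.values())):
--         for item, cnt in frequency_count.items():
--             if cnt == c:
--                 ordered.append(item)
--     return ordered[n - 1]
-- ===== Notes on version B (the rewrite author's own statement) =====
-- stated objective: alternative
-- what changed: Instead of stably sorting all (item,count) pairs by count, B sorts only the set of distinct frequencies and concatenates frequency buckets by scanning the dict in insertion order, then indexes the ordered item list.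
import Mathlib
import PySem

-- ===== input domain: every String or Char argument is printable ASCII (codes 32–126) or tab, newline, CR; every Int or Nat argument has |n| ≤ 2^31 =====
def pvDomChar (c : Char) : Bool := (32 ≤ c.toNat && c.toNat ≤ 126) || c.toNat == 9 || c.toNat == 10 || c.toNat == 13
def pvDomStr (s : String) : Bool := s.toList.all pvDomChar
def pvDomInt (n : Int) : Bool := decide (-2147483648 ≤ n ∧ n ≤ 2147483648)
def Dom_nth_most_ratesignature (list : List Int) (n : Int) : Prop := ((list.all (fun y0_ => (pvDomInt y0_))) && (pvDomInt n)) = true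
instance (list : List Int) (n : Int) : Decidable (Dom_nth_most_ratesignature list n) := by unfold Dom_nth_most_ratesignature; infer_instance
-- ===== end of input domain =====

-- B buckets items by frequency (sorting only the distinct counts) instead of stably sorting all (item,count) pairs; alternative decomposition, same results.


-- ===== PORT A =====
def nth_most_ratesignature (list : List Int) (n : Int) : Int :=
  let frequency_count : PySem.Dict Int Int :=
    list.foldl (fun d i => if d.contains i then d.modify i 0 (· + 1) else d.insert i 1)
      PySem.Dict.empty
  let sorted_frequency := PySem.List.sorted frequency_count.items (fun x => x.2)
  match PySem.List.pyGet? sorted_frequency (n - 1) with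
  | some rarest_pair => rarest_pair.1
  | none => 0   -- unreachable under Pre_: Python raises IndexError here

-- ===== PORT B =====
def nth_most_ratesignature_alt (list : List Int) (n : Int) : Int :=
  let frequency_count : PySem.Dict Int Int :=
    list.foldl (fun d i => d.insert i (d.getD i 0 + 1)) PySem.Dict.empty
  let ordered : List Int :=
    (PySem.List.sorted (PySem.Set.ofList frequency_count.values) (fun c => c)).foldl
      (fun acc c =>
        frequency_count.items.foldl
          (fun acc p => if p.2 == c then acc ++ [p.1] else acc) acc)
      []
  match PySem.List.pyGet? ordered (n - 1) with
  | some r => r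
  | none => 0   -- unreachable under Pre_: Python raises IndexError here

-- ===== PRECONDITION & SPEC =====
-- Pre_ excludes exactly the inputs where Python's indexing [n-1] raises IndexError
-- (the ordered list has one entry per distinct element of `list`).
def Pre_nth_most_ratesignature (list : List Int) (n : Int) : Prop :=
  PySem.Raise.InRange (PySem.Set.ofList list).length (n - 1)
instance (list : List Int) (n : Int) : Decidable (Pre_nth_most_ratesignature list n) := by
  unfold Pre_nth_most_ratesignature; infer_instance

def pvWitness_nth_most_ratesignature : List Int × Int := ([1, 2, 2], 1)

def Spec_nth_most_ratesignature (list : List Int) (n : Int) (out : Int) : Prop := out = nth_most_ratesignature_alt list n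
instance (list : List Int) (n : Int) (out : Int) : Decidable (Spec_nth_most_ratesignature list n out) := by unfold Spec_nth_most_ratesignature; infer_instance

-- ===== CLAIM (what is proved, stated in full; the proofs are below) =====
def Claim_equal_nth_most_ratesignature : Prop := ∀ (list : List Int) (n : Int), Dom_nth_most_ratesignature list n → Pre_nth_most_ratesignature list n → Spec_nth_most_ratesignature list n (nth_most_ratesignature list n)

-- ===== LEMMAS AND PROOFS =====

-- pyGet? commutes with map
lemma pyGet?_map {α β : Type} (f : α → β) (xs : List α) (i : Int) :
    PySem.List.pyGet? (xs.map f) i = (PySem.List.pyGet? xs i).map f := by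
  simp [PySem.List.pyGet?, PySem.List.pyIdx?]

-- inserting into L ++ R when everything in L is not-after x and everything in R is after x
lemma insertBy_split {α : Type} (key : α → Int) (x : α) (L R : List α)
    (hL : ∀ y ∈ L, ¬ key x < key y) (hR : ∀ y ∈ R, key x < key y) :
    PySem.List.insertBy (fun a b => decide (key a < key b)) x (L ++ R) = L ++ x :: R := by
  induction L with
  | nil =>
      cases R with
      | nil => rfl
      | cons r rs =>
          simp [PySem.List.insertBy, hR r (by simp)]
  | cons l ls ih =>
      have h1 : ¬ key x < key l := hL l (by simp)
      simp [PySem.List.insertBy, h1]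
      exact ih (fun y hy => hL y (by simp [hy]))

-- stable sort by key = concatenation of key-buckets over any strictly increasing
-- list of keys covering all keys of xs
lemma bucket_sort {α : Type} (key : α → Int) (ks : List Int) (hks : ks.Pairwise (· < ·)) :
    ∀ xs : List α, (∀ a ∈ xs, key a ∈ ks) →
      PySem.List.sorted xs key = ks.flatMap (fun k => xs.filter (fun a => key a == k)) := by
  intro xs
  induction xs using List.reverseRecOn with
  | nil => rw [PySem.List.sorted_eq_foldl_insertBy]; simp
  | append_singleton xs x ih =>
      intro hcov
      have hx : key x ∈ ks := hcov x (by simp)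
      obtain ⟨ks₁, ks₂, hsplit⟩ := List.append_of_mem hx
      subst hsplit
      have hpw := hks
      rw [List.pairwise_append] at hpw
      have h2 := hpw.2.1
      rw [List.pairwise_cons] at h2
      have hlt1 : ∀ k ∈ ks₁, k < key x := fun k hk => hpw.2.2 k hk (key x) (by simp)
      have hlt2 : ∀ k ∈ ks₂, key x < k := h2.1
      have hrec := ih (fun a ha => hcov a (by simp [ha]))
      rw [PySem.List.sorted_eq_foldl_insertBy, List.foldl_append,
        ← PySem.List.sorted_eq_foldl_insertBy, hrec]
      simp only [List.foldl_cons, List.foldl_nil]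
      -- left part: buckets for ks₁ and for key x; right part: buckets for ks₂
      rw [List.flatMap_append, List.flatMap_cons]
      rw [← List.append_assoc]
      rw [insertBy_split key x
        (ks₁.flatMap (fun k => xs.filter (fun a => key a == k)) ++
          xs.filter (fun a => key a == key x))
        (ks₂.flatMap (fun k => xs.filter (fun a => key a == k)))
        (by
          intro y hy
          rcases List.mem_append.1 hy with h | h
          · obtain ⟨k, hk, hyk⟩ := List.mem_flatMap.1 h
            have : key y = k := by simpa using (List.of_mem_filter hyk)
            have := hlt1 k hk
            omega
          · have : key y = key x := by simpa using (List.of_mem_filter h)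
            omega)
        (by
          intro y hy
          obtain ⟨k, hk, hyk⟩ := List.mem_flatMap.1 hy
          have : key y = k := by simpa using (List.of_mem_filter hyk)
          have := hlt2 k hk
          omega)]
      -- now rewrite the buckets of xs ++ [x]
      rw [List.flatMap_append, List.flatMap_cons]
      have hb1 : ks₁.flatMap (fun k => (xs ++ [x]).filter (fun a => key a == k)) =
          ks₁.flatMap (fun k => xs.filter (fun a => key a == k)) := by
        refine List.flatMap_congr ?_
        intro k hk
        have hne : ¬ ((key x == k) = true) := by
          have := hlt1 k hk; simp; omega
        simp [List.filter_append, hne]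
      have hb2 : ks₂.flatMap (fun k => (xs ++ [x]).filter (fun a => key a == k)) =
          ks₂.flatMap (fun k => xs.filter (fun a => key a == k)) := by
        refine List.flatMap_congr ?_
        intro k hk
        have hne : ¬ ((key x == k) = true) := by
          have := hlt2 k hk; simp; omega
        simp [List.filter_append, hne]
      have hmid : (xs ++ [x]).filter (fun a => key a == key x) =
          xs.filter (fun a => key a == key x) ++ [x] := by
        simp [List.filter_append]
      rw [hb1, hb2, hmid]
      simp
  
lemma a_dict_eq_counter (list : List Int) :
    list.foldl (fun d i => if d.contains i then d.modify i 0 (· + 1) else d.insert i 1)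
      PySem.Dict.empty = PySem.Dict.counter list := by
  have hstep : (fun (d : PySem.Dict Int Int) (i : Int) =>
      if d.contains i then d.modify i 0 (· + 1) else d.insert i 1) =
      (fun d i => d.modify i 0 (· + 1)) := by
    funext d i
    by_cases h : d.contains i = true
    · simp [h]
    · simp [h, PySem.Dict.modify,
        PySem.Dict.getD_of_not_contains _ _ (by simpa using h)]
  rw [hstep, PySem.Dict.counter_eq_foldl]

-- ===== VERDICT (by name: the statement is the Claim_ definition above) =====
theorem nth_most_ratesignature_spec : Claim_equal_nth_most_ratesignature := by
  intro list n _ _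
  unfold Spec_nth_most_ratesignature nth_most_ratesignature nth_most_ratesignature_alt
  rw [a_dict_eq_counter, PySem.Dict.foldl_insert_getD_add_one_eq_counter]
  simp only [PySem.List.foldl_append_if, PySem.List.foldl_append_eq_flatMap]
  have hbuck := bucket_sort (fun p : Int × Int => p.2)
    (PySem.List.sorted (PySem.Set.ofList (PySem.Dict.counter list).values) (fun c => c))
    (PySem.List.sorted_ofList_pairwise_lt _)
    (PySem.Dict.counter list).items
    (by
      intro a ha
      rw [PySem.List.mem_sorted, PySem.Set.mem_ofList]
      exact List.mem_map_of_mem ha)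
  simp only [List.nil_append]
  rw [← List.map_flatMap, ← hbuck, pyGet?_map]
  cases PySem.List.pyGet? (PySem.List.sorted (PySem.Dict.counter list).items (fun x => x.2)) (n - 1) <;> simp
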